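-- pv_equiv track=rewrite | github.com/maemreyo/learning-content-specifier | factory/scripts/python/validate_artifact_contracts.py | _phase_status
-- ===== SOURCE A (Python) =====
-- from typing import Any
--
-- def _phase_status(findings: list[dict[str, Any]], default: str = "PASS") -> tuple[str, str]:
--     if not findings:
--         return default, "INFO"
--
--     if any(item["severity"] in {"CRITICAL", "HIGH"} for item in findings):
--         return "BLOCK", "HIGH"
--     if any(item["severity"] in {"MEDIUM", "LOW"} for item in findings):
--         return "WARN", "MEDIUM"
--     return "PASS", "INFO"
-- ===== SOURCE B (Python) =====
-- def _phase_status(findings, default="PASS"):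
--     if not findings:
--         return default, "INFO"
--     saw_medium = False
--     for item in findings:
--         sev = item["severity"]
--         if sev in {"CRITICAL", "HIGH"}:
--             return "BLOCK", "HIGH"
--         if sev in {"MEDIUM", "LOW"}:
--             saw_medium = True
--     return ("WARN", "MEDIUM") if saw_medium else ("PASS", "INFO")
-- ===== Notes on version B (the rewrite author's own statement) =====
-- stated objective: alternative
-- what changed: Replaces A's two sequential any() scans with one single-pass loop maintaining a saw_medium flag and returning early on CRITICAL/HIGH.
import Mathlib
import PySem

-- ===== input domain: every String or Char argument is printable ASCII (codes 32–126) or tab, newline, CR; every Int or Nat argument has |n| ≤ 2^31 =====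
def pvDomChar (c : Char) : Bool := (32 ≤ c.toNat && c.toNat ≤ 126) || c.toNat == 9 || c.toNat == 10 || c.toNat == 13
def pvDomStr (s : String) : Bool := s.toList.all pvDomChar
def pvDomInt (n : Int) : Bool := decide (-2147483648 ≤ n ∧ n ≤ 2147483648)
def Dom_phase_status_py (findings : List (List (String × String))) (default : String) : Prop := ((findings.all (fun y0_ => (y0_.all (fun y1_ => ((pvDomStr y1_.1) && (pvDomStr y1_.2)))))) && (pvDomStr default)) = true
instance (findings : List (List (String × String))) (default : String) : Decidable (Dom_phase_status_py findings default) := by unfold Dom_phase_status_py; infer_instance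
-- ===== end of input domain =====

-- B replaces A's two sequential any() scans by one single-pass loop with a saw_medium flag
-- and an early return on CRITICAL/HIGH (objective: alternative decomposition, same behaviour).

-- ===== PORT A =====
-- any(item["severity"] in sevs for item in findings); none = KeyError (missing "severity").
def pvAnySev (sevs : List String) : List (List (String × String)) → Option Bool
  | [] => some false
  | d :: rest =>
    match (PySem.Dict.mk d).get? "severity" with
    | none => none
    | some v => if sevs.contains v then some true else pvAnySev sevs rest

def phase_status_py (findings : List (List (String × String))) (default : String) : String × String :=
  if findings = [] then (default, "INFO")
  else
    match pvAnySev ["CRITICAL", "HIGH"] findings with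
    | some true => ("BLOCK", "HIGH")
    | _ =>
      match pvAnySev ["MEDIUM", "LOW"] findings with
      | some true => ("WARN", "MEDIUM")
      | _ => ("PASS", "INFO")

-- ===== PORT B =====
-- the single for-loop of Source B; the KeyError case (get? = none) lies outside Pre_ below.
def pvLoopB : List (List (String × String)) → Bool → String × String
  | [], sawMedium => if sawMedium then ("WARN", "MEDIUM") else ("PASS", "INFO")
  | d :: rest, sawMedium =>
    match (PySem.Dict.mk d).get? "severity" with
    | none => ("PASS", "INFO")  -- Python raises KeyError here; excluded by Pre_
    | some v =>
      if ["CRITICAL", "HIGH"].contains v then ("BLOCK", "HIGH")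
      else pvLoopB rest (sawMedium || ["MEDIUM", "LOW"].contains v)

def phase_status_py_alt (findings : List (List (String × String))) (default : String) : String × String :=
  if findings = [] then (default, "INFO")
  else pvLoopB findings false

-- ===== PRECONDITION & SPEC =====
def pvHasSev (d : List (String × String)) : Bool := ((PySem.Dict.mk d).get? "severity").isSome
def pvCH (d : List (String × String)) : Bool :=
  ((PySem.Dict.mk d).get? "severity").getD "" = "CRITICAL" || ((PySem.Dict.mk d).get? "severity").getD "" = "HIGH"

-- Pre_ excludes exactly the inputs where Python A raises KeyError: an item without a
-- "severity" key that is reached before any CRITICAL/HIGH item.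
def Pre_phase_status_py (findings : List (List (String × String))) (_default : String) : Prop :=
  (∀ d ∈ findings, pvHasSev d = true) ∨ (findings.takeWhile pvHasSev).any pvCH = true
instance (findings : List (List (String × String))) (default : String) : Decidable (Pre_phase_status_py findings default) := by unfold Pre_phase_status_py; infer_instance

def pvWitness_phase_status_py : (List (List (String × String))) × String :=
  ([[("severity", "LOW")], [("severity", "HIGH")]], "PASS")

def Spec_phase_status_py (findings : List (List (String × String))) (default : String) (out : String × String) : Prop := out = phase_status_py_alt findings default
instance (findings : List (List (String × String))) (default : String) (out : String × String) : Decidable (Spec_phase_status_py findings default out) := by unfold Spec_phase_status_py; infer_instance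

-- ===== CLAIM (what is proved, stated in full; the proofs are below) =====
def Claim_equal_phase_status_py : Prop := ∀ (findings : List (List (String × String))) (default : String), Dom_phase_status_py findings default → Pre_phase_status_py findings default → Spec_phase_status_py findings default (phase_status_py findings default)

-- ===== LEMMAS AND PROOFS =====

-- unfolding equations for the two loops (keep `contains` unnormalized)
lemma anySev_cons_none {sevs : List String} {d : List (String × String)} {rest : List (List (String × String))}
    (hg : (PySem.Dict.mk d).get? "severity" = none) : pvAnySev sevs (d :: rest) = none := by
  simp [pvAnySev, hg]

lemma anySev_cons_some {sevs : List String} {d : List (String × String)} {rest : List (List (String × String))}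
    {v : String} (hg : (PySem.Dict.mk d).get? "severity" = some v) :
    pvAnySev sevs (d :: rest) = if sevs.contains v = true then some true else pvAnySev sevs rest := by
  simp only [pvAnySev, hg]

lemma loopB_cons_some {d : List (String × String)} {rest : List (List (String × String))} {b : Bool}
    {v : String} (hg : (PySem.Dict.mk d).get? "severity" = some v) :
    pvLoopB (d :: rest) b =
      if (["CRITICAL", "HIGH"] : List String).contains v = true then ("BLOCK", "HIGH")
      else pvLoopB rest (b || (["MEDIUM", "LOW"] : List String).contains v) := by
  simp only [pvLoopB, hg]

-- If the first scan of A hits CRITICAL/HIGH, B's loop returns BLOCK from any state.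
lemma loopB_of_anyCH : ∀ (fs : List (List (String × String))) (b : Bool),
    pvAnySev ["CRITICAL", "HIGH"] fs = some true → pvLoopB fs b = ("BLOCK", "HIGH") := by
  intro fs
  induction fs with
  | nil => intro b h; simp [pvAnySev] at h
  | cons d rest ih =>
    intro b h
    cases hg : (PySem.Dict.mk d).get? "severity" with
    | none => rw [anySev_cons_none hg] at h; exact absurd h (by simp)
    | some v =>
      rw [anySev_cons_some hg] at h
      rw [loopB_cons_some hg]
      by_cases hc : (["CRITICAL", "HIGH"] : List String).contains v = true
      · rw [if_pos hc]
      · rw [if_neg hc] at h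
        rw [if_neg hc]
        exact ih _ h

-- If the first scan finds no CRITICAL/HIGH (and no KeyError), B's loop matches A's second scan.
lemma loopB_of_noCH : ∀ (fs : List (List (String × String))) (b : Bool),
    pvAnySev ["CRITICAL", "HIGH"] fs = some false →
    pvLoopB fs b =
      (if b || (pvAnySev ["MEDIUM", "LOW"] fs == some true) then ("WARN", "MEDIUM") else ("PASS", "INFO")) := by
  intro fs
  induction fs with
  | nil => intro b h; cases b <;> simp [pvAnySev, pvLoopB]
  | cons d rest ih =>
    intro b h
    cases hg : (PySem.Dict.mk d).get? "severity" with
    | none => rw [anySev_cons_none hg] at h; exact absurd h (by simp)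
    | some v =>
      rw [anySev_cons_some hg] at h
      rw [loopB_cons_some hg, anySev_cons_some (sevs := ["MEDIUM", "LOW"]) hg]
      by_cases hc : (["CRITICAL", "HIGH"] : List String).contains v = true
      · rw [if_pos hc] at h; exact absurd h (by simp)
      · rw [if_neg hc] at h
        rw [if_neg hc, ih _ h]
        by_cases hm : (["MEDIUM", "LOW"] : List String).contains v = true
        · rw [if_pos hm, hm]
          simp
        · rw [Bool.not_eq_true] at hm
          rw [hm]
          simp

-- All keys present ⇒ the scan cannot raise.
lemma anySev_of_allKeys (sevs : List String) : ∀ (fs : List (List (String × String))),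
    (∀ d ∈ fs, pvHasSev d = true) → ∃ r, pvAnySev sevs fs = some r := by
  intro fs
  induction fs with
  | nil => intro _; exact ⟨false, rfl⟩
  | cons d rest ih =>
    intro h
    have hd := h d (by simp)
    rw [pvHasSev, Option.isSome_iff_exists] at hd
    obtain ⟨v, hv⟩ := hd
    by_cases hc : sevs.contains v = true
    · exact ⟨true, by rw [anySev_cons_some hv, if_pos hc]⟩
    · obtain ⟨r, hr⟩ := ih (fun x hx => h x (by simp [hx]))
      exact ⟨r, by rw [anySev_cons_some hv, if_neg hc, hr]⟩

-- A CRITICAL/HIGH hit in the key-carrying prefix ⇒ A's first scan returns true.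
lemma anyCH_of_prefix : ∀ (fs : List (List (String × String))),
    (fs.takeWhile pvHasSev).any pvCH = true → pvAnySev ["CRITICAL", "HIGH"] fs = some true := by
  intro fs
  induction fs with
  | nil => intro h; simp at h
  | cons d rest ih =>
    intro h
    by_cases hk : pvHasSev d = true
    · rw [List.takeWhile_cons_of_pos hk] at h
      simp only [List.any_cons, Bool.or_eq_true] at h
      rw [pvHasSev, Option.isSome_iff_exists] at hk
      obtain ⟨v, hv⟩ := hk
      rw [anySev_cons_some hv]
      by_cases hc : (["CRITICAL", "HIGH"] : List String).contains v = true
      · rw [if_pos hc]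
      · rw [if_neg hc]
        apply ih
        rcases h with h | h
        · exfalso
          rw [pvCH, hv] at h
          simp only [Option.getD_some, Bool.or_eq_true, decide_eq_true_eq] at h
          rcases h with h | h <;> simp [h] at hc
        · exact h
    · rw [List.takeWhile_cons_of_neg (by simpa using hk)] at h
      simp at h

-- ===== VERDICT (by name: the statement is the Claim_ definition above) =====
theorem phase_status_py_spec : Claim_equal_phase_status_py := by
  intro findings default _hdom hpre
  unfold Spec_phase_status_py phase_status_py phase_status_py_alt
  by_cases hnil : findings = []
  · simp [hnil]
  · simp only [hnil, if_false]
    rcases hpre with hall | hpref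
    · obtain ⟨r, hr⟩ := anySev_of_allKeys ["CRITICAL", "HIGH"] findings hall
      cases r with
      | true => rw [hr, loopB_of_anyCH findings false hr]
      | false =>
        rw [hr, loopB_of_noCH findings false hr]
        obtain ⟨r2, hr2⟩ := anySev_of_allKeys ["MEDIUM", "LOW"] findings hall
        cases r2 <;> simp [hr2]
    · have h1 := anyCH_of_prefix findings hpref
      rw [h1, loopB_of_anyCH findings false h1]
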